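-- pv_equiv track=rewrite | github.com/njw1204/BOJ-AC | problem/1000~9999/04347/4347.py3.py | unhash
-- ===== SOURCE A (Python) =====
-- def unhash(hh):
--     field=[[0]*3 for i in range(3)]
--     for i in range(3):
--         for j in range(3):
--             if hh%3==0: field[i][j]="."
--             elif hh%3==1: field[i][j]="X"
--             else: field[i][j]="O"
--             hh//=3
--     return field
-- ===== SOURCE B (Python) =====
-- _ROWS = [a + b + c for c in ".XO" for b in ".XO" for a in ".XO"]
--
--
-- def unhash(hh):
--     return [list(_ROWS[hh // 27 ** i % 27]) for i in range(3)]
-- ===== Notes on version B (the rewrite author's own statement) =====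
-- stated objective: alternative
-- what changed: Replaces A's stateful repeated-division loop that classifies one cell per step with a table-driven decoder: a 27-entry table of all possible row strings is precomputed once, and each of the 3 rows is obtained by a single base-27 digit lookup list(_ROWS[hh // 27**i % 27]).
import Mathlib
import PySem

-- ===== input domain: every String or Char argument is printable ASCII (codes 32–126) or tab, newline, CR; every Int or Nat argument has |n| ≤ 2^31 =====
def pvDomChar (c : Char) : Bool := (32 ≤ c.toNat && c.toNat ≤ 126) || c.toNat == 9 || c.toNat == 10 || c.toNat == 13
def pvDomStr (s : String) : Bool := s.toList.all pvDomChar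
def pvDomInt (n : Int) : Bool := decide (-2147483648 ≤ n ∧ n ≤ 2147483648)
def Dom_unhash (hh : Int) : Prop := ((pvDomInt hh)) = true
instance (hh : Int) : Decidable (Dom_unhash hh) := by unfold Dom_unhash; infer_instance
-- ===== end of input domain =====

-- B replaces A's stateful repeated-division loop by a precomputed 27-entry table of row
-- strings indexed by one base-27 digit per row (objective: alternative).

-- ===== PORT A =====
-- the integer 0 placeholders of `[[0]*3 for i in range(3)]` are overwritten before the
-- grid is returned; they are ported as the string "0"
def unhash (hh : Int) : List (List String) :=
  let field0 : List (List String) := (List.range 3).map (fun _ => List.replicate 3 "0")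
  let res := (PySem.List.pyRange 0 3 1).foldl (fun (st : List (List String) × Int) i =>
      (PySem.List.pyRange 0 3 1).foldl (fun (st : List (List String) × Int) j =>
        let v : String := if PySem.Int.mod st.2 3 = 0 then "."
          else if PySem.Int.mod st.2 3 = 1 then "X" else "O"
        (st.1.set i.toNat ((st.1.getD i.toNat []).set j.toNat v),
         PySem.Int.floordiv st.2 3)) st)
    (field0, hh)
  res.1

-- ===== PORT B =====
-- `_ROWS = [a + b + c for c in ".XO" for b in ".XO" for a in ".XO"]`
def rowsTable : List String :=
  ".XO".toList.flatMap (fun c =>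
    ".XO".toList.flatMap (fun b =>
      ".XO".toList.map (fun a => String.ofList [a, b, c])))

-- `list(_ROWS[hh // 27 ** i % 27])`; Python's list() of a 3-char string is the list of
-- its 1-char strings (the index is always in range, so the none branch is unreachable)
def unhash_alt (hh : Int) : List (List String) :=
  (PySem.List.pyRange 0 3 1).map (fun i =>
    match PySem.List.pyGet? rowsTable
        (PySem.Int.mod (PySem.Int.floordiv hh (27 ^ i.toNat)) 27) with
    | some s => s.toList.map (fun ch => String.ofList [ch])
    | none => [])

-- ===== PRECONDITION & SPEC =====
def Spec_unhash (hh : Int) (out : List (List String)) : Prop := out = unhash_alt hh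
instance (hh : Int) (out : List (List String)) : Decidable (Spec_unhash hh out) := by unfold Spec_unhash; infer_instance

-- ===== CLAIM (what is proved, stated in full; the proofs are below) =====
def Claim_equal_unhash : Prop := ∀ (hh : Int), Dom_unhash hh → Spec_unhash hh (unhash hh)

-- ===== LEMMAS AND PROOFS =====

-- the symbol of one base-3 digit, and one Python division step `hh //= 3`
def symD (d : Int) : String := if d = 0 then "." else if d = 1 then "X" else "O"
def d3 (a : Int) : Int := PySem.Int.floordiv a 3

theorem fd3 (a : Int) : PySem.Int.floordiv a 3 = d3 a := rfl

-- dividing by n·3 is dividing by n and then by 3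
theorem fdstep (a n : Int) (hn : 0 < n) :
    PySem.Int.floordiv a (n * 3) = PySem.Int.floordiv (PySem.Int.floordiv a n) 3 := by
  rw [PySem.Int.floordiv_eq_ediv_of_pos (by positivity),
      PySem.Int.floordiv_eq_ediv_of_pos hn,
      PySem.Int.floordiv_eq_ediv_of_pos (by norm_num)]
  exact (Int.ediv_ediv_of_nonneg (le_of_lt hn)).symm

theorem fd1 (a : Int) : PySem.Int.floordiv a 1 = a := by
  rw [PySem.Int.floordiv_eq_ediv_of_pos (by norm_num), Int.ediv_one]
theorem fd9 (a : Int) : PySem.Int.floordiv a 9 = d3 (PySem.Int.floordiv a 3) := by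
  rw [show (9 : Int) = 3 * 3 from rfl]; exact fdstep a 3 (by norm_num)
theorem fd27 (a : Int) : PySem.Int.floordiv a 27 = d3 (PySem.Int.floordiv a 9) := by
  rw [show (27 : Int) = 9 * 3 from rfl]; exact fdstep a 9 (by norm_num)
theorem fd81 (a : Int) : PySem.Int.floordiv a 81 = d3 (PySem.Int.floordiv a 27) := by
  rw [show (81 : Int) = 27 * 3 from rfl]; exact fdstep a 27 (by norm_num)
theorem fd243 (a : Int) : PySem.Int.floordiv a 243 = d3 (PySem.Int.floordiv a 81) := by
  rw [show (243 : Int) = 81 * 3 from rfl]; exact fdstep a 81 (by norm_num)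
theorem fd729 (a : Int) : PySem.Int.floordiv a 729 = d3 (PySem.Int.floordiv a 243) := by
  rw [show (729 : Int) = 243 * 3 from rfl]; exact fdstep a 243 (by norm_num)

-- B's one-row lookup, evaluated: the three base-3 digits of the base-27 digit of m
theorem rowEval (m : Int) :
    (match PySem.List.pyGet? rowsTable (PySem.Int.mod m 27) with
     | some s => s.toList.map (fun ch => String.ofList [ch])
     | none => ([] : List String)) =
    [symD (PySem.Int.mod m 3),
     symD (PySem.Int.mod (PySem.Int.floordiv m 3) 3),
     symD (PySem.Int.mod (PySem.Int.floordiv m 9) 3)] := by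
  rw [PySem.Int.mod_eq_emod_of_pos (by norm_num : (0:Int) < 27),
      PySem.Int.mod_eq_emod_of_pos (by norm_num : (0:Int) < 3),
      PySem.Int.mod_eq_emod_of_pos (by norm_num : (0:Int) < 3),
      PySem.Int.mod_eq_emod_of_pos (by norm_num : (0:Int) < 3),
      PySem.Int.floordiv_eq_ediv_of_pos (by norm_num : (0:Int) < 3),
      PySem.Int.floordiv_eq_ediv_of_pos (by norm_num : (0:Int) < 9)]
  have d0 : m % 3 = (m % 27) % 3 := by omega
  have d1 : (m / 3) % 3 = ((m % 27) / 3) % 3 := by omega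
  have d2 : (m / 9) % 3 = ((m % 27) / 9) % 3 := by omega
  rw [d0, d1, d2]
  have h0 : 0 ≤ m % 27 := Int.emod_nonneg m (by norm_num)
  have h1 : m % 27 < 27 := Int.emod_lt_of_pos m (by norm_num)
  interval_cases h : m % 27 <;> decide

-- ===== VERDICT (by name: the statement is the Claim_ definition above) =====
theorem unhash_spec : Claim_equal_unhash := by
  intro hh _
  show unhash hh = unhash_alt hh
  have hA : unhash hh =
      [[symD (PySem.Int.mod hh 3), symD (PySem.Int.mod (d3 hh) 3), symD (PySem.Int.mod (d3 (d3 hh)) 3)],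
       [symD (PySem.Int.mod (d3 (d3 (d3 hh))) 3), symD (PySem.Int.mod (d3 (d3 (d3 (d3 hh)))) 3),
        symD (PySem.Int.mod (d3 (d3 (d3 (d3 (d3 hh))))) 3)],
       [symD (PySem.Int.mod (d3 (d3 (d3 (d3 (d3 (d3 hh)))))) 3),
        symD (PySem.Int.mod (d3 (d3 (d3 (d3 (d3 (d3 (d3 hh))))))) 3),
        symD (PySem.Int.mod (d3 (d3 (d3 (d3 (d3 (d3 (d3 (d3 hh)))))))) 3)]] := rfl
  have hB : unhash_alt hh =
      [(match PySem.List.pyGet? rowsTable (PySem.Int.mod (PySem.Int.floordiv hh 1) 27) with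
        | some s => s.toList.map (fun ch => String.ofList [ch]) | none => []),
       (match PySem.List.pyGet? rowsTable (PySem.Int.mod (PySem.Int.floordiv hh 27) 27) with
        | some s => s.toList.map (fun ch => String.ofList [ch]) | none => []),
       (match PySem.List.pyGet? rowsTable (PySem.Int.mod (PySem.Int.floordiv hh 729) 27) with
        | some s => s.toList.map (fun ch => String.ofList [ch]) | none => [])] := rfl
  rw [hA, hB, rowEval, rowEval, rowEval]
  simp only [fd1, fd729, fd243, fd81, fd27, fd9, fd3]
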